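-- pv_equiv track=rewrite | github.com/yuhangear/change | wenet/bin/word_alignment.py | get_frames_timestamp
-- ===== SOURCE A (Python) =====
-- def get_frames_timestamp(alignment):
--     # convert alignment to a praat format, which is a doing phonetics
--     # by computer and helps analyzing alignment
--     timestamp = []
--     # get frames level duration for each token
--     start = 0
--     end = 0
--     while end < len(alignment):
--         while end < len(alignment) and alignment[end] == 0:
--             end += 1
--         if end == len(alignment):
--             timestamp[-1] += alignment[start:]
--             break
--         end += 1
--         while end < len(alignment) and alignment[end - 1] == alignment[end]:
--             end += 1
--         timestamp.append(alignment[start:end])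
--         start = end
--     return timestamp
-- ===== SOURCE B (Python) =====
-- def get_frames_timestamp(alignment):
--     # One-pass state machine: grow a current segment (zeros then an equal
--     # nonzero run); flush it whenever the next frame breaks the run.
--     timestamp = []
--     seg = []
--     for x in alignment:
--         if seg and seg[-1] != 0 and seg[-1] != x:
--             timestamp.append(seg)
--             seg = []
--         seg.append(x)
--     if seg:
--         if seg[-1] != 0:
--             timestamp.append(seg)
--         else:
--             timestamp[-1] += seg
--     return timestamp
-- ===== Notes on version B (the rewrite author's own statement) =====
-- stated objective: simpler
-- what changed: Replaced A's nested while-loops with manual double index pointers and slicing by a single forward pass that grows a current segment and flushes it when the run breaks.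
import Mathlib
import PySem

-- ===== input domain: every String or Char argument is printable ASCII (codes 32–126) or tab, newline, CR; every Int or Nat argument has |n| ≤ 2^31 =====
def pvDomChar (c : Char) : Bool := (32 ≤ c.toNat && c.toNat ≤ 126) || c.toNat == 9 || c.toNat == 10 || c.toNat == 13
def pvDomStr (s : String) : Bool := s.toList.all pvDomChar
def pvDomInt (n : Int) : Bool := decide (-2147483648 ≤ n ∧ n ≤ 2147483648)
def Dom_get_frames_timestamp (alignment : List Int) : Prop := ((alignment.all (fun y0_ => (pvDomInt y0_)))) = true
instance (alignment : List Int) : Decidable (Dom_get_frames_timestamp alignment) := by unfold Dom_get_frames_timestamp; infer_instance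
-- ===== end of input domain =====

-- B replaces A's nested-while double-pointer scan with a single forward pass
-- keeping a current segment; same return value, simpler and avoids repeated slicing.


-- Both Pythons execute `timestamp[-1] += xs`; on empty `timestamp` Python raises
-- IndexError (excluded by Pre_), here we return the list unchanged.
def pyAddToLast (ts : List (List Int)) (xs : List Int) : List (List Int) :=
  match ts.getLast? with
  | none => ts
  | some l => ts.dropLast ++ [l ++ xs]

-- ===== PORT A =====
-- inner `while end < len and alignment[end] == 0: end += 1`
def skipA (a : List Int) (e : Nat) : Nat :=
  if e < a.length then
    if a.getD e 0 = 0 then skipA a (e + 1) else e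
  else e
termination_by a.length - e

-- inner `while end < len and alignment[end-1] == alignment[end]: end += 1`
def runA (a : List Int) (e : Nat) : Nat :=
  if e < a.length then
    if a.getD (e - 1) 0 = a.getD e 0 then runA a (e + 1) else e
  else e
termination_by a.length - e

theorem skipA_ge (a : List Int) (e : Nat) : e ≤ skipA a e := by
  unfold skipA
  split
  · split
    · exact le_trans (Nat.le_succ e) (skipA_ge a (e + 1))
    · exact le_refl e
  · exact le_refl e
termination_by a.length - e

theorem runA_ge (a : List Int) (e : Nat) : e ≤ runA a e := by
  unfold runA
  split
  · split
    · exact le_trans (Nat.le_succ e) (runA_ge a (e + 1))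
    · exact le_refl e
  · exact le_refl e
termination_by a.length - e

-- outer `while end < len(alignment)` loop of A; `s` is both `start` and `end`
-- (they are equal at the top of every outer iteration);
-- `alignment[start:end]` with 0 ≤ start ≤ end is `(a.drop start).take (end-start)`.
def goA (a : List Int) (s : Nat) (ts : List (List Int)) : List (List Int) :=
  if _h : s < a.length then
    let e1 := skipA a s
    if e1 = a.length then pyAddToLast ts (a.drop s)
    else
      let e2 := runA a (e1 + 1)
      goA a e2 (ts ++ [(a.drop s).take (e2 - s)])
  else ts
termination_by a.length - s
decreasing_by
  have h1 : s ≤ skipA a s := skipA_ge a s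
  have h2 : skipA a s + 1 ≤ runA a (skipA a s + 1) := runA_ge a (skipA a s + 1)
  omega

def get_frames_timestamp (alignment : List Int) : List (List Int) :=
  goA alignment 0 []

-- ===== PORT B =====
-- body of B's `for x in alignment` loop (state = (timestamp, seg));
-- `if seg and seg[-1] != 0 and seg[-1] != x` checked via getLast?
def stepB (st : List (List Int) × List Int) (x : Int) : List (List Int) × List Int :=
  match st.2.getLast? with
  | some v => if v ≠ 0 ∧ v ≠ x then (st.1 ++ [st.2], [x]) else (st.1, st.2 ++ [x])
  | none => (st.1, st.2 ++ [x])

-- B's code after the loop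
def finishB (st : List (List Int) × List Int) : List (List Int) :=
  match st.2.getLast? with
  | none => st.1
  | some v => if v ≠ 0 then st.1 ++ [st.2] else pyAddToLast st.1 st.2

def get_frames_timestamp_alt (alignment : List Int) : List (List Int) :=
  finishB (alignment.foldl stepB ([], []))

-- ===== PRECONDITION & SPEC =====
-- Pre_ excludes exactly the inputs on which Python A raises IndexError
-- (a nonempty alignment containing only zeros: `timestamp[-1]` on empty list);
-- Python B raises the same IndexError there.
def Pre_get_frames_timestamp (alignment : List Int) : Prop :=
  alignment = [] ∨ ∃ x ∈ alignment, x ≠ 0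
instance (alignment : List Int) : Decidable (Pre_get_frames_timestamp alignment) := by
  unfold Pre_get_frames_timestamp; infer_instance
def pvWitness_get_frames_timestamp : List Int := [0, 5, 5, 0, 2]

def Spec_get_frames_timestamp (alignment : List Int) (out : List (List Int)) : Prop := out = get_frames_timestamp_alt alignment
instance (alignment : List Int) (out : List (List Int)) : Decidable (Spec_get_frames_timestamp alignment out) := by unfold Spec_get_frames_timestamp; infer_instance

-- ===== CLAIM (what is proved, stated in full; the proofs are below) =====
def Claim_equal_get_frames_timestamp : Prop := ∀ (alignment : List Int), Dom_get_frames_timestamp alignment → Pre_get_frames_timestamp alignment → Spec_get_frames_timestamp alignment (get_frames_timestamp alignment)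

-- ===== LEMMAS AND PROOFS =====

theorem skipA_spec (a : List Int) (e : Nat) :
    skipA a e = e + ((a.drop e).takeWhile (fun x => x == 0)).length := by
  unfold skipA
  split
  · rename_i h
    have hd : a.drop e = a[e] :: a.drop (e + 1) := List.drop_eq_getElem_cons h
    have hg : a.getD e 0 = a[e] := by
      simp [List.getD_eq_getElem?_getD, List.getElem?_eq_getElem h]
    split
    · rename_i hz
      rw [skipA_spec a (e + 1), hd]
      simp only [List.takeWhile]
      rw [hg] at hz
      simp [hz]
      omega
    · rename_i hz
      rw [hg] at hz
      rw [hd]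
      simp only [List.takeWhile]
      have : (a[e] == 0) = false := by simpa using hz
      simp [this]
  · rename_i h
    have : a.drop e = [] := List.drop_eq_nil_of_le (by omega)
    simp [this]
termination_by a.length - e

theorem runA_spec (a : List Int) (e : Nat) (v : Int) (hv : a.getD (e - 1) 0 = v) :
    runA a e = e + ((a.drop e).takeWhile (fun x => x == v)).length := by
  unfold runA
  split
  · rename_i h
    have hd : a.drop e = a[e] :: a.drop (e + 1) := List.drop_eq_getElem_cons h
    have hg : a.getD e 0 = a[e] := by
      simp [List.getD_eq_getElem?_getD, List.getElem?_eq_getElem h]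
    split
    · rename_i heq
      have hav : a[e] = v := by rw [hv] at heq; rw [← hg, ← heq]
      have hv' : a.getD (e + 1 - 1) 0 = v := by simp only [Nat.add_sub_cancel]; rw [hg]; exact hav
      rw [runA_spec a (e + 1) v hv', hd]
      simp only [List.takeWhile]
      simp [hav]
      omega
    · rename_i heq
      rw [hv, hg] at heq
      rw [hd]
      simp only [List.takeWhile]
      have : (a[e] == v) = false := by simpa using fun h' => heq h'.symm
      simp [this]
  · rename_i h
    have : a.drop e = [] := List.drop_eq_nil_of_le (by omega)
    simp [this]
termination_by a.length - e

-- folding stepB over zeros only appends them to a segment whose last is 0 (or empty)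
theorem foldB_zeros (Z : List Int) (hZ : ∀ x ∈ Z, x = 0) :
    ∀ (ts : List (List Int)) (seg : List Int),
      (seg.getLast? = none ∨ seg.getLast? = some 0) →
      List.foldl stepB (ts, seg) Z = (ts, seg ++ Z) := by
  induction Z with
  | nil => intro ts seg _; simp
  | cons z Z ih =>
    intro ts seg hseg
    have hz : z = 0 := hZ z (by simp)
    have hstep : stepB (ts, seg) z = (ts, seg ++ [z]) := by
      unfold stepB
      rcases hseg with h | h <;> simp [h]
    have hlast : (seg ++ [z]).getLast? = some 0 := by simp [hz]
    simp only [List.foldl_cons, hstep]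
    rw [ih (fun x hx => hZ x (by simp [hx])) ts (seg ++ [z]) (Or.inr hlast)]
    simp

-- folding stepB over copies of the segment's own last element only appends them
theorem foldB_run (R : List Int) (v : Int) (hR : ∀ x ∈ R, x = v) :
    ∀ (ts : List (List Int)) (seg : List Int),
      seg.getLast? = some v →
      List.foldl stepB (ts, seg) R = (ts, seg ++ R) := by
  induction R with
  | nil => intro ts seg _; simp
  | cons r R ih =>
    intro ts seg hseg
    have hr : r = v := hR r (by simp)
    have hstep : stepB (ts, seg) r = (ts, seg ++ [r]) := by
      unfold stepB
      simp [hseg, hr]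
    simp only [List.foldl_cons, hstep]
    rw [ih (fun x hx => hR x (by simp [hx])) ts (seg ++ [r]) (by simp [hr])]
    simp

-- flushing a completed segment: continuing the fold from (ts, S) or from
-- (ts ++ [S], []) gives the same final answer when the next element breaks S
theorem foldB_flush (rest : List Int) (ts : List (List Int)) (S : List Int) (v : Int)
    (hS : S.getLast? = some v) (hv : v ≠ 0) (hhead : ∀ w, rest.head? = some w → w ≠ v) :
    finishB (List.foldl stepB (ts, S) rest) = finishB (List.foldl stepB (ts ++ [S], []) rest) := by
  cases rest with
  | nil => simp [finishB, hS, hv]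
  | cons y rest' =>
    have hy : y ≠ v := hhead y rfl
    have hvy : ¬ v = y := fun hh => hy hh.symm
    have h1 : stepB (ts, S) y = (ts ++ [S], [y]) := by
      unfold stepB
      simp [hS, hv, hvy]
    have h2 : stepB (ts ++ [S], []) y = (ts ++ [S], [y]) := by
      unfold stepB; simp
    simp only [List.foldl_cons, h1, h2]

theorem getD_drop_head (a : List Int) (e : Nat) (he : e < a.length) :
    (a.drop e).head? = some (a.getD e 0) := by
  rw [List.head?_drop]
  simp [List.getElem?_eq_getElem he, List.getD_eq_getElem?_getD]

theorem last_of_all_eq (l : List Int) (v : Int) (hne : l ≠ []) (h : ∀ x ∈ l, x = v) :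
    l.getLast? = some v := by
  rw [List.getLast?_eq_some_iff]
  exact ⟨l.dropLast, by
    conv_lhs => rw [← List.dropLast_concat_getLast hne]
    congr 1
    simp [h _ (List.getLast_mem hne)]⟩

-- the first element surviving dropWhile fails the predicate
theorem dropWhile_head_not (p : Int → Bool) (l : List Int) (v : Int) (W' : List Int)
    (h : l.dropWhile p = v :: W') : p v = false := by
  induction l with
  | nil => simp at h
  | cons x xs ih =>
    rw [List.dropWhile_cons] at h
    split at h
    · exact ih h
    · rename_i hx
      obtain ⟨hxv, -⟩ := List.cons.inj h
      rw [← hxv]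
      simpa using hx

-- main loop correspondence: A's outer loop from index s equals B's fold over the suffix
theorem goA_eq (a : List Int) (s : Nat) (ts : List (List Int)) :
    goA a s ts = finishB (List.foldl stepB (ts, []) (a.drop s)) := by
  unfold goA
  split
  · rename_i h
    -- decompose the suffix: zeros, then the nonzero run, then the rest
    set l := a.drop s with hl
    set Z := l.takeWhile (fun x => x == 0) with hZdef
    have hZ0 : ∀ x ∈ Z, x = 0 := by
      intro x hx
      simpa using List.mem_takeWhile_imp hx
    have hskip : skipA a s = s + Z.length := skipA_spec a s
    have hZsplit : l = Z ++ l.dropWhile (fun x => x == 0) := by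
      rw [hZdef]; exact (List.takeWhile_append_dropWhile).symm
    have hdropZ : a.drop (s + Z.length) = l.dropWhile (fun x => x == 0) := by
      have h1 : a.drop (s + Z.length) = l.drop Z.length := by
        rw [hl, List.drop_drop]
      rw [h1]
      conv_lhs => rw [hZsplit]
      exact List.drop_left ..
    by_cases hend : skipA a s = a.length
    · -- only zeros remain: A appends them to the last segment, B's pending does too
      simp only [hend]
      have hW : l.dropWhile (fun x => x == 0) = [] := by
        rw [← hdropZ, ← hskip, hend]
        exact List.drop_length
      have hlZ : l = Z := by rw [hZsplit, hW]; simp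
      have hlne : l ≠ [] := by
        rw [hl]
        intro hnil
        have := List.drop_eq_nil_iff.mp hnil
        omega
      rw [foldB_zeros l (hlZ ▸ hZ0) ts [] (Or.inl rfl)]
      have hlast : l.getLast? = some 0 := last_of_all_eq l 0 hlne (hlZ ▸ hZ0)
      simp [finishB, hlast]
    · simp only [if_neg hend]
      set W := l.dropWhile (fun x => x == 0) with hWdef
      have he1lt : skipA a s < a.length := by
        rcases Nat.lt_or_ge (skipA a s) a.length with h' | h'
        · exact h'
        · exfalso; apply hend
          have : a.length ≤ skipA a s := h'
          have h2 : skipA a s ≤ a.length := by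
            rw [hskip]
            have : Z.length ≤ l.length := by rw [hZdef]; exact (List.takeWhile_sublist _).length_le
            rw [hl] at this
            simp [List.length_drop] at this
            omega
          omega
      set e1 := skipA a s with he1
      have hdropE1 : a.drop e1 = W := by rw [hskip]; exact hdropZ
      have hWne : W ≠ [] := by
        intro hWnil
        rw [hWnil] at hdropE1
        have := List.drop_eq_nil_iff.mp hdropE1
        omega
      obtain ⟨v0, W', hW'⟩ : ∃ v0 W', W = v0 :: W' := by
        rcases W with _ | ⟨w, W'⟩
        · exact absurd rfl hWne
        · exact ⟨w, W', rfl⟩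
      have hv : a.getD e1 0 = v0 := by
        have := getD_drop_head a e1 he1lt
        rw [hdropE1, hW'] at this
        simpa using this.symm
      have hvne : v0 ≠ 0 := by
        have hnp := dropWhile_head_not (fun x : Int => x == 0) l v0 W' (by rw [← hWdef]; exact hW')
        simpa using hnp
      set R := W'.takeWhile (fun x => x == v0) with hRdef
      have hRv : ∀ x ∈ R, x = v0 := by
        intro x hx
        simpa using List.mem_takeWhile_imp hx
      have hRsplit : W' = R ++ W'.dropWhile (fun x => x == v0) := by
        rw [hRdef]; exact (List.takeWhile_append_dropWhile).symm
      have hdropE11 : a.drop (e1 + 1) = W' := by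
        have h1 : a.drop (e1 + 1) = (a.drop e1).drop 1 := by rw [List.drop_drop]
        rw [h1, hdropE1, hW']; simp
      have hrun : runA a (e1 + 1) = (e1 + 1) + R.length := by
        have hv' : a.getD (e1 + 1 - 1) 0 = v0 := by
          simp only [Nat.add_sub_cancel]; exact hv
        rw [runA_spec a (e1 + 1) v0 hv', hdropE11, hRdef]
      set e2 := runA a (e1 + 1) with he2
      set rest := W'.dropWhile (fun x => x == v0) with hrestdef
      have hdropE2 : a.drop e2 = rest := by
        rw [hrun]
        have h1 : a.drop (e1 + 1 + R.length) = (a.drop (e1 + 1)).drop R.length := by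
          rw [List.drop_drop]
        rw [h1, hdropE11]
        conv_lhs => rw [hRsplit]
        exact List.drop_left ..
      have hhead : ∀ w, rest.head? = some w → w ≠ v0 := by
        intro w hw hwv
        rcases hr : rest with _ | ⟨r, rest'⟩
        · rw [hr] at hw; simp at hw
        · rw [hr] at hw
          simp at hw
          have hnp := dropWhile_head_not (fun x : Int => x == v0) W' r rest'
            (by rw [← hrestdef]; exact hr)
          rw [hw, hwv] at hnp
          simp at hnp
      have hlsplit : l = (Z ++ v0 :: R) ++ rest := by
        rw [hZsplit, hW']
        conv_lhs => rw [hRsplit]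
        simp
      -- the segment A slices out
      have hslice : (a.drop s).take (e2 - s) = Z ++ v0 :: R := by
        rw [← hl]
        conv_lhs => rw [hlsplit]
        have hlen2 : e2 - s = (Z ++ v0 :: R).length := by
          simp only [List.length_append, List.length_cons]
          omega
        rw [hlen2]
        exact List.take_left
      set S := Z ++ v0 :: R with hSdef
      have hSlast : S.getLast? = some v0 := by
        rw [hSdef]
        have hcr : (v0 :: R).getLast? = some v0 :=
          last_of_all_eq (v0 :: R) v0 (by simp)
            (by intro x hx; rcases List.mem_cons.mp hx with h' | h'; exact h'; exact hRv x h')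
        rw [List.getLast?_append_of_ne_nil Z (by simp)]
        exact hcr
      -- B's fold over the completed segment
      have hfold : List.foldl stepB (ts, ([] : List Int)) (Z ++ v0 :: R) = (ts, S) := by
        rw [List.foldl_append, foldB_zeros Z hZ0 ts [] (Or.inl rfl)]
        simp only [List.nil_append, List.foldl_cons]
        have hstepv : stepB (ts, Z) v0 = (ts, Z ++ [v0]) := by
          unfold stepB
          rcases List.eq_nil_or_concat Z with hZnil | ⟨Z', z, hZc⟩
          · simp [hZnil]
          · have : Z.getLast? = some 0 := last_of_all_eq Z 0 (by simp [hZc]) hZ0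
            simp [this]
        rw [hstepv, foldB_run R v0 hRv ts (Z ++ [v0]) (by simp)]
        rw [hSdef]
        simp
      have hlt : a.length - e2 < a.length - s := by
        have h1 : s ≤ e1 := he1 ▸ skipA_ge a s
        have h2 : e1 + 1 ≤ e2 := he2 ▸ runA_ge a (e1 + 1)
        omega
      rw [hslice, goA_eq a e2 (ts ++ [S]), hdropE2]
      conv_rhs => rw [hlsplit, List.foldl_append, hfold]
      exact (foldB_flush rest ts S v0 hSlast hvne hhead).symm
  · rename_i h
    have : a.drop s = [] := List.drop_eq_nil_of_le (by omega)
    simp [this, finishB]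
termination_by a.length - s
decreasing_by exact hlt

-- ===== VERDICT (by name: the statement is the Claim_ definition above) =====
theorem get_frames_timestamp_spec : Claim_equal_get_frames_timestamp := by
  intro alignment _ _
  unfold Spec_get_frames_timestamp get_frames_timestamp get_frames_timestamp_alt
  rw [goA_eq]
  simp
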